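-- pv_equiv track=rewrite | github.com/DmytroLyt/Anagram_With_Unittest | anagrams/anagrams.py | reverse_sentence
-- ===== SOURCE A (Python) =====
-- def reverse_word(word: str):
--     remove_symbols = [symbol for symbol in word if symbol.isalpha()]
--     reversed_word = []
--     for symbol in word:
--         if symbol.isalpha():
--             reversed_word.append(remove_symbols.pop())
--         else:
--             reversed_word.append(symbol)
--     reversed_sent = ''.join(reversed_word)
--     return reversed_sent
--
-- def reverse_sentence(text: str):
--     if not isinstance(text, str):
--         raise AttributeError("Text must be a string")
--
--     text_list = text.split(' ')
--     reversed_text = []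
--     for word in text_list:
--         reversed_text.append(reverse_word(word))
--     reverse_text = ' '.join(reversed_text)
--     return reverse_text
-- ===== SOURCE B (Python) =====
-- def _reverse_word(word: str):
--     # Peel the word from both ends: non-letters stay where they are,
--     # a letter pair at the two ends is swapped across.
--     cs = list(word)
--     prefix = []
--     suffix = []
--     i = 0  # front of the un-consumed window; the back is the end of cs
--     while len(cs) - i >= 2:
--         if not cs[i].isalpha():
--             prefix.append(cs[i])
--             i += 1
--         elif not cs[-1].isalpha():
--             suffix.append(cs.pop())
--         else:
--             prefix.append(cs.pop())
--             suffix.append(cs[i])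
--             i += 1
--     suffix.reverse()
--     return ''.join(prefix) + ''.join(cs[i:]) + ''.join(suffix)
--
-- def reverse_sentence(text: str):
--     if not isinstance(text, str):
--         raise AttributeError("Text must be a string")
--     return ' '.join(_reverse_word(w) for w in text.split(' '))
-- ===== Notes on version B (the rewrite author's own statement) =====
-- stated objective: alternative
-- what changed: reverse_word no longer collects the letters and then re-walks the word popping them off a second list; each word is peeled from both ends in one converging loop that keeps non-letters in place and swaps the outermost letter pair into a prefix and a suffix.
import Mathlib
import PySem

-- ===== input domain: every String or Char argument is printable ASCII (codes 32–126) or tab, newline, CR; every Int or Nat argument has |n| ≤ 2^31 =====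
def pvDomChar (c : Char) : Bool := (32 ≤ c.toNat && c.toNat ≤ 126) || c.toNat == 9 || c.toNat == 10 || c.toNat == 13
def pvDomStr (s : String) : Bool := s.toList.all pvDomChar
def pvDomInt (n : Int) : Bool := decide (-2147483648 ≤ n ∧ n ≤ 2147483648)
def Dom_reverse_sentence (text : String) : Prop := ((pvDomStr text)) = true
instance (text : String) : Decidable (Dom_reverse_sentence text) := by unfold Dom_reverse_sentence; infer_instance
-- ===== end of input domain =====

-- B reverses the letters of each word by peeling the word from both ends and swapping the
-- outermost letter pair, instead of A's collect-letters-then-pop second pass (objective: alternative).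

-- ===== PORT A =====
-- reverse_word: collect the alpha chars, then re-walk the word popping them from the end.
def pvRevWordA (word : List Char) : List Char :=
  let remove_symbols := word.filter (fun c => PySem.Chars.isalpha c)
  (word.foldl (fun (st : List Char × List Char) symbol =>
      if PySem.Chars.isalpha symbol then
        match PySem.List.pop? st.1 (-1) with
        | some (x, rest) => (rest, st.2 ++ [x])
        | none => (st.1, st.2)   -- Python would raise IndexError; unreachable (counts match)
      else (st.1, st.2 ++ [symbol])) (remove_symbols, [])).2

def reverse_sentence (text : String) : String :=
  let text_list := PySem.Chars.splitOn text.toList [' ']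
  let reversed_text := text_list.foldl (fun acc word => acc ++ [pvRevWordA word]) []
  String.ofList (PySem.Chars.join [' '] reversed_text)

-- ===== PORT B =====
-- the while-loop of _reverse_word: peel cs from both ends into prefix / suffix
def pvTpLoop (cs pre suf : List Char) : List Char :=
  if h : cs.length < 2 then pre ++ cs ++ suf.reverse
  else
    let c := cs.head!
    let d := cs.getLast!
    if PySem.Chars.isalpha c = false then pvTpLoop cs.tail (pre ++ [c]) suf
    else if PySem.Chars.isalpha d = false then pvTpLoop cs.dropLast pre (suf ++ [d])
    else pvTpLoop cs.tail.dropLast (pre ++ [d]) (suf ++ [c])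
termination_by cs.length
decreasing_by
  · simp [List.length_tail]; omega
  · simp [List.length_dropLast]; omega
  · simp [List.length_tail, List.length_dropLast]; omega

def pvRevWordB (word : List Char) : List Char := pvTpLoop word [] []

def reverse_sentence_alt (text : String) : String :=
  String.ofList (PySem.Chars.join [' ']
    ((PySem.Chars.splitOn text.toList [' ']).map pvRevWordB))

-- ===== PRECONDITION & SPEC =====
def Spec_reverse_sentence (text : String) (out : String) : Prop := out = reverse_sentence_alt text
instance (text : String) (out : String) : Decidable (Spec_reverse_sentence text out) := by unfold Spec_reverse_sentence; infer_instance

-- ===== CLAIM (what is proved, stated in full; the proofs are below) =====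
def Claim_equal_reverse_sentence : Prop := ∀ (text : String), Dom_reverse_sentence text → Spec_reverse_sentence text (reverse_sentence text)

-- ===== LEMMAS AND PROOFS =====

-- common characterisation: word with its k-th alpha char replaced by r_k
def pvFill : List Char → List Char → List Char
  | [], _ => []
  | c :: t, r =>
    if PySem.Chars.isalpha c then r.headD c :: pvFill t r.tail
    else c :: pvFill t r

theorem pvFill_append (xs ys r : List Char) :
    pvFill (xs ++ ys) r
      = pvFill xs r ++ pvFill ys (r.drop (xs.filter (fun c => PySem.Chars.isalpha c)).length) := by
  induction xs generalizing r with
  | nil => simp [pvFill]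
  | cons c t ih =>
    by_cases h : PySem.Chars.isalpha c
    · simp [pvFill, h, ih, List.drop_tail]
    · simp [pvFill, h, ih]

theorem pvFill_extra (xs r s : List Char)
    (h : (xs.filter (fun c => PySem.Chars.isalpha c)).length ≤ r.length) :
    pvFill xs (r ++ s) = pvFill xs r := by
  induction xs generalizing r with
  | nil => simp [pvFill]
  | cons c t ih =>
    by_cases hc : PySem.Chars.isalpha c
    · cases r with
      | nil => simp [hc] at h
      | cons a r' =>
        simp [pvFill, hc]
        exact ih r' (by simp [hc] at h; omega)
    · simp [pvFill, hc]
      exact ih r (by simp [hc] at h; omega)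

theorem pvFill_short (cs : List Char) (h : cs.length < 2) :
    pvFill cs ((cs.filter (fun c => PySem.Chars.isalpha c)).reverse) = cs := by
  match cs with
  | [] => simp [pvFill]
  | [c] =>
    by_cases hc : PySem.Chars.isalpha c <;> simp [pvFill, hc]
  | c :: d :: t => simp at h

-- A's pop-from-the-end loop is pvFill with the reversed alpha list
theorem pvRevA_loop (w rs acc : List Char)
    (h : (w.filter (fun c => PySem.Chars.isalpha c)).length ≤ rs.length) :
    (w.foldl (fun (st : List Char × List Char) symbol =>
      if PySem.Chars.isalpha symbol then
        match PySem.List.pop? st.1 (-1) with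
        | some (x, rest) => (rest, st.2 ++ [x])
        | none => (st.1, st.2)
      else (st.1, st.2 ++ [symbol])) (rs, acc)).2 = acc ++ pvFill w rs.reverse := by
  induction w generalizing rs acc with
  | nil => simp [pvFill]
  | cons c t ih =>
    by_cases hc : PySem.Chars.isalpha c
    · simp [hc] at h
      have hrs : rs ≠ [] := by intro e; subst e; simp at h
      obtain ⟨ys, x, rfl⟩ : ∃ ys x, rs = ys ++ [x] := by
        rcases List.eq_nil_or_concat rs with e | ⟨ys, x, e⟩
        · exact absurd e hrs
        · exact ⟨ys, x, by simpa using e⟩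
      simp only [List.foldl_cons, hc, if_true, PySem.List.pop?_last]
      rw [ih ys (acc ++ [x]) (by simp at h ⊢; omega)]
      simp [pvFill, hc]
    · simp only [List.foldl_cons, hc, if_false, Bool.false_eq_true]
      rw [ih rs (acc ++ [c]) (by simp [hc] at h ⊢; omega)]
      simp [pvFill, hc]

theorem pvRevWordA_eq_fill (w : List Char) :
    pvRevWordA w = pvFill w ((w.filter (fun c => PySem.Chars.isalpha c)).reverse) := by
  unfold pvRevWordA
  simpa using pvRevA_loop w (w.filter (fun c => PySem.Chars.isalpha c)) [] (le_refl _)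

-- B's peeling loop is the same pvFill
theorem pvTpLoop_eq_fill (n : Nat) (cs pre suf : List Char) (hn : cs.length ≤ n) :
    pvTpLoop cs pre suf
      = pre ++ pvFill cs ((cs.filter (fun c => PySem.Chars.isalpha c)).reverse) ++ suf.reverse := by
  induction n generalizing cs pre suf with
  | zero =>
    cases cs with
    | nil => rw [pvTpLoop]; simp [pvFill]
    | cons c t => simp at hn
  | succ n ih =>
    rw [pvTpLoop]
    by_cases hlen : cs.length < 2
    · simp only [dif_pos hlen]
      rw [pvFill_short cs hlen]
    · obtain ⟨c, t, rfl⟩ : ∃ c t, cs = c :: t := by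
        cases cs with
        | nil => simp at hlen
        | cons c t => exact ⟨c, t, rfl⟩
      have ht : t ≠ [] := by intro e; subst e; simp at hlen
      obtain ⟨m, d, rfl⟩ : ∃ m d, t = m ++ [d] := by
        rcases List.eq_nil_or_concat t with e | ⟨m, d, e⟩
        · exact absurd e ht
        · exact ⟨m, d, by simpa using e⟩
      have hh : (c :: (m ++ [d])).head! = c := rfl
      have hl : (c :: (m ++ [d])).getLast! = d := by
        have h5 : (c :: (m ++ [d])).getLast? = some d := by
          rw [← List.cons_append]; exact List.getLast?_concat ..
        simp [List.getLast!_eq_getLast?_getD, h5]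
      simp only [dif_neg hlen, hh, hl, List.tail_cons]
      split_ifs with h1 h2
      · -- first char not alpha: moved to the prefix
        rw [ih (m ++ [d]) (pre ++ [c]) suf (by simp at hn ⊢; omega)]
        simp [pvFill, h1]
      · -- last char not alpha: moved to the suffix
        have hc : PySem.Chars.isalpha c = true := by
          cases hcb : PySem.Chars.isalpha c
          · exact absurd hcb h1
          · rfl
        have hdrop : (c :: (m ++ [d])).dropLast = c :: m := by
          rw [show c :: (m ++ [d]) = (c :: m) ++ [d] by simp]
          exact List.dropLast_concat ..
        rw [hdrop]
        rw [ih (c :: m) pre (suf ++ [d]) (by simp at hn ⊢; omega)]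
        have key : pvFill (c :: (m ++ [d]))
            ((List.filter (fun c => PySem.Chars.isalpha c) (c :: (m ++ [d]))).reverse)
            = pvFill (c :: m)
                ((List.filter (fun c => PySem.Chars.isalpha c) (c :: m)).reverse) ++ [d] := by
          have hF : List.filter (fun c => PySem.Chars.isalpha c) (c :: (m ++ [d]))
              = List.filter (fun c => PySem.Chars.isalpha c) (c :: m) := by
            rw [show c :: (m ++ [d]) = (c :: m) ++ [d] by simp, List.filter_append]
            simp [h2]
          rw [hF, show c :: (m ++ [d]) = (c :: m) ++ [d] by simp, pvFill_append]
          simp [pvFill, h2]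
        rw [key]
        simp
      · -- both end chars alpha: swapped across
        have hc : PySem.Chars.isalpha c = true := by
          cases hcb : PySem.Chars.isalpha c
          · exact absurd hcb h1
          · rfl
        have hd : PySem.Chars.isalpha d = true := by
          cases hdb : PySem.Chars.isalpha d
          · exact absurd hdb h2
          · rfl
        have hmd : (m ++ [d]).dropLast = m := List.dropLast_concat ..
        rw [hmd]
        rw [ih m (pre ++ [d]) (suf ++ [c]) (by simp at hn ⊢; omega)]
        have key : pvFill (c :: (m ++ [d]))
            ((List.filter (fun c => PySem.Chars.isalpha c) (c :: (m ++ [d]))).reverse)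
            = d :: (pvFill m ((List.filter (fun c => PySem.Chars.isalpha c) m).reverse) ++ [c]) := by
          have hF : (List.filter (fun c => PySem.Chars.isalpha c) (c :: (m ++ [d]))).reverse
              = d :: ((List.filter (fun c => PySem.Chars.isalpha c) m).reverse ++ [c]) := by
            simp [List.filter_append, hc, hd]
          rw [hF]
          simp only [pvFill, hc, if_true, List.headD_cons, List.tail_cons]
          rw [pvFill_append m [d]]
          rw [show ((List.filter (fun c => PySem.Chars.isalpha c) m).reverse ++ [c]).drop
                (List.filter (fun c => PySem.Chars.isalpha c) m).length = [c] by
              rw [List.drop_append_of_le_length (by simp)]; simp]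
          rw [pvFill_extra m _ [c] (by simp)]
          simp [pvFill, hd]
        rw [key]
        simp

theorem pvRevWord_eq (w : List Char) : pvRevWordA w = pvRevWordB w := by
  rw [pvRevWordA_eq_fill, pvRevWordB, pvTpLoop_eq_fill w.length w [] [] (le_refl _)]
  simp

theorem pvFoldlAppend_eq_map {α β : Type} (f : α → β) (l : List α) (acc : List β) :
    l.foldl (fun acc w => acc ++ [f w]) acc = acc ++ l.map f := by
  induction l generalizing acc with
  | nil => simp
  | cons x t ih => simp [ih]

-- ===== VERDICT (by name: the statement is the Claim_ definition above) =====
theorem reverse_sentence_spec : Claim_equal_reverse_sentence := by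
  intro text _
  unfold Spec_reverse_sentence
  simp only [reverse_sentence, reverse_sentence_alt]
  rw [pvFoldlAppend_eq_map]
  simp only [List.nil_append]
  congr 1
  apply congrArg
  apply List.map_congr_left
  intro w _
  exact pvRevWord_eq w
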